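-- pv_equiv track=rewrite | github.com/maisamkhorshidi/gp_package | genforge/gp_getdepth.py | gp_getdepth
-- ===== SOURCE A (Python) =====
-- def gp_getdepth(expr):
--     """
--     Calculate the depth of an expression based on the number of open and close brackets.
--
--     Args:
--     expr (str): The expression as a string.
--
--     Returns:
--     int: The depth of the expression.
--     """
--
--     # Replace empty parentheses '()' with an empty string
--     expr = expr.replace('()', '')
--
--     # Find indices of open and close brackets
--     open_br = [i for i, char in enumerate(expr) if char == '(']
--     close_br = [i for i, char in enumerate(expr) if char == ')']
--     num_open = len(open_br)
--
--     if num_open == 0:  # i.e., a single node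
--         depth = 1
--         return depth
--     elif num_open == 1:
--         depth = 2
--         return depth
--     else:
--         # depth = max consecutive number of open brackets + 1
--         br_vec = [0] * len(expr)
--         for i in open_br:
--             br_vec[i] = 1
--         for i in close_br:
--             br_vec[i] = -1
--         cumsum_br_vec = [sum(br_vec[:i+1]) for i in range(len(br_vec))]
--         depth = max(cumsum_br_vec) + 1
--         return depth
-- ===== SOURCE B (Python) =====
-- def gp_getdepth(expr):
--     # Single pass: running bracket balance, tracking its maximum and the count of open brackets.
--     expr = expr.replace('()', '')
--     opens = 0
--     bal = 0
--     best = None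
--     for ch in expr:
--         if ch == '(':
--             opens += 1
--             bal += 1
--         elif ch == ')':
--             bal -= 1
--         if best is None or bal > best:
--             best = bal
--     if opens == 0:
--         return 1
--     if opens == 1:
--         return 2
--     return best + 1
-- ===== Notes on version B (the rewrite author's own statement) =====
-- stated objective: faster
-- what changed: Replaces the index-list construction, bracket vector and quadratic prefix-sum recomputation with a single pass over the string that keeps a running balance, its running maximum and a count of open brackets.
import Mathlib
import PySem

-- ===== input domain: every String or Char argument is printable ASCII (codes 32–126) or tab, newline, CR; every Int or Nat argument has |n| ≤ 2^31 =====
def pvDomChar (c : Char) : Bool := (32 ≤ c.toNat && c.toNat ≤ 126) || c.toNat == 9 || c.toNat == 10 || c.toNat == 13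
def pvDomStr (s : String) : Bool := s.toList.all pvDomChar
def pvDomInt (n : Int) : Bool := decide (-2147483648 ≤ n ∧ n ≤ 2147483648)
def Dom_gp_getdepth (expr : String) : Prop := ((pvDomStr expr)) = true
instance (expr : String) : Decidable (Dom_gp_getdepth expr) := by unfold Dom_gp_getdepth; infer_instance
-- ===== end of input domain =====

-- B is a single pass with a running balance instead of A's index lists + bracket vector + quadratic prefix sums.

-- ===== PORT A =====
def gp_getdepth (expr : String) : Int :=
  let e := (PySem.Str.replace expr "()" "").toList
  let open_br := (PySem.List.enumerate e 0).filterMap (fun q => if q.2 = '(' then some q.1 else none)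
  let close_br := (PySem.List.enumerate e 0).filterMap (fun q => if q.2 = ')' then some q.1 else none)
  let num_open := open_br.length
  if num_open = 0 then 1
  else if num_open = 1 then 2
  else
    let br0 := PySem.List.pyRepeat [(0 : Int)] (e.length : Int)
    let br1 := open_br.foldl (fun v i => PySem.List.pySetD v i 1) br0
    let br2 := close_br.foldl (fun v i => PySem.List.pySetD v i (-1)) br1
    let cumsum := (PySem.List.pyRange 0 (br2.length : Int) 1).map
      (fun i => (PySem.List.slice br2 none (some (i + 1))).sum)
    -- cumsum is nonempty here (num_open ≥ 2), so Python's max never raises; the getD default is unreachable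
    (PySem.List.max? cumsum (fun y => y)).getD 0 + 1

-- ===== PORT B =====
def gp_getdepth_alt (expr : String) : Int :=
  let e := (PySem.Str.replace expr "()" "").toList
  let st := e.foldl (fun (st : Int × Int × Option Int) ch =>
      let opens := if ch = '(' then st.1 + 1 else st.1
      let bal := if ch = '(' then st.2.1 + 1 else if ch = ')' then st.2.1 - 1 else st.2.1
      let best := match st.2.2 with
        | none => some bal
        | some b => if bal > b then some bal else some b
      (opens, bal, best)) ((0 : Int), (0 : Int), (none : Option Int))
  if st.1 = 0 then 1
  else if st.1 = 1 then 2
  else st.2.2.getD 0 + 1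

-- ===== PRECONDITION & SPEC =====
def Spec_gp_getdepth (expr : String) (out : Int) : Prop := out = gp_getdepth_alt expr
instance (expr : String) (out : Int) : Decidable (Spec_gp_getdepth expr out) := by unfold Spec_gp_getdepth; infer_instance

-- ===== CLAIM (what is proved, stated in full; the proofs are below) =====
def Claim_equal_gp_getdepth : Prop := ∀ (expr : String), Dom_gp_getdepth expr → Spec_gp_getdepth expr (gp_getdepth expr)

-- ===== LEMMAS AND PROOFS =====

-- ±1/0 weight of a character (the value A writes into br_vec at that position)
def pvVal (c : Char) : Int := if c = '(' then 1 else if c = ')' then -1 else 0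

-- running prefix sums starting from b
def pvScan (b : Int) : List Int → List Int
  | [] => []
  | x :: xs => (b + x) :: pvScan (b + x) xs

-- one step of B's running-max-with-None accumulator
def pvMStep (acc : Option Int) (x : Int) : Option Int :=
  match acc with
  | none => some x
  | some a => if x > a then some x else some a

lemma pv_len_idxs (c : Char) (cs : List Char) (s : Int) :
    ((PySem.List.enumerate cs s).filterMap (fun q => if q.2 = c then some q.1 else none)).length
      = cs.countP (fun x => x = c) := by
  induction cs generalizing s with
  | nil => simp [PySem.List.enumerate_nil]
  | cons a t ih =>
    rw [PySem.List.enumerate_cons, List.filterMap_cons, List.countP_cons]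
    by_cases h : a = c <;> simp [h, ih]

lemma pv_mem_idxs (c : Char) (cs : List Char) (s x : Int) :
    (x ∈ (PySem.List.enumerate cs s).filterMap (fun q => if q.2 = c then some q.1 else none))
      ↔ ∃ (k : Nat) (h : k < cs.length), x = s + k ∧ cs[k] = c := by
  induction cs generalizing s with
  | nil => simp [PySem.List.enumerate_nil]
  | cons a t ih =>
    rw [PySem.List.enumerate_cons, List.filterMap_cons]
    by_cases h : a = c
    · dsimp only
      rw [if_pos h]
      rw [List.mem_cons, ih]
      constructor
      · rintro (rfl | ⟨k, hk, rfl, hc⟩)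
        · exact ⟨0, by simp, by simp, by simpa using h⟩
        · exact ⟨k + 1, by simp only [List.length_cons]; omega, by push_cast; ring, by simpa using hc⟩
      · rintro ⟨k, hk, hx, hc⟩
        cases k with
        | zero => left; simpa using hx
        | succ k =>
          right
          exact ⟨k, by simp only [List.length_cons] at hk; omega, by rw [hx]; push_cast; ring,
            by simpa using hc⟩
    · dsimp only
      rw [if_neg h]
      rw [ih]
      constructor
      · rintro ⟨k, hk, rfl, hc⟩
        exact ⟨k + 1, by simp only [List.length_cons]; omega, by push_cast; ring, by simpa using hc⟩
      · rintro ⟨k, hk, hx, hc⟩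
        cases k with
        | zero => exact absurd (by simpa using hc) h
        | succ k =>
          exact ⟨k, by simp only [List.length_cons] at hk; omega, by rw [hx]; push_cast; ring,
            by simpa using hc⟩

lemma pv_len_foldsets (is : List Int) (x : Int) (v : List Int) :
    (is.foldl (fun w i => PySem.List.pySetD w i x) v).length = v.length := by
  induction is generalizing v with
  | nil => rfl
  | cons i t ih => rw [List.foldl_cons, ih, PySem.List.length_pySetD]

lemma pv_get_foldsets (is : List Int) (x : Int) (v : List Int) (j : Nat)
    (his : ∀ i ∈ is, 0 ≤ i) :
    (is.foldl (fun w i => PySem.List.pySetD w i x) v)[j]? =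
      if (j : Int) ∈ is ∧ j < v.length then some x else v[j]? := by
  induction is generalizing v with
  | nil => simp
  | cons i t ih =>
    have hi : 0 ≤ i := his i (List.mem_cons_self ..)
    rw [List.foldl_cons, ih _ (fun a ha => his a (List.mem_cons_of_mem _ ha)),
        PySem.List.pySetD_of_nonneg v x hi, List.length_set, List.getElem?_set]
    simp only [List.mem_cons]
    by_cases hjl : j < v.length
    · by_cases hjt : (j : Int) ∈ t
      · simp [hjt, hjl]
      · by_cases hji : (j : Int) = i
        · have ht : i.toNat = j := by omega
          simp [hjt, hjl, hji, ht]
        · have ht : ¬ i.toNat = j := by omega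
          simp [hjt, hjl, hji, ht]
    · by_cases hji : i.toNat = j
      · have h1 : ¬ i.toNat < v.length := by omega
        have h2 : v[j]? = none := List.getElem?_eq_none (by omega)
        simp [hjl, hji, h1, h2]
      · simp [hjl, hji]

lemma pv_brvec (cs : List Char) :
    ((PySem.List.enumerate cs 0).filterMap (fun q => if q.2 = ')' then some q.1 else none)).foldl
        (fun v i => PySem.List.pySetD v i (-1))
        (((PySem.List.enumerate cs 0).filterMap (fun q => if q.2 = '(' then some q.1 else none)).foldl
          (fun v i => PySem.List.pySetD v i 1)
          (PySem.List.pyRepeat [(0 : Int)] (cs.length : Int)))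
      = cs.map pvVal := by
  have hrep : PySem.List.pyRepeat [(0 : Int)] (cs.length : Int) = List.replicate cs.length (0 : Int) := by
    rw [PySem.List.pyRepeat_singleton, Int.toNat_natCast]
  have hnn : ∀ (c : Char) (i : Int),
      i ∈ (PySem.List.enumerate cs 0).filterMap (fun q => if q.2 = c then some q.1 else none) → 0 ≤ i := by
    intro c i hi
    rcases (pv_mem_idxs c cs 0 i).1 hi with ⟨k, hk, rfl, _⟩
    omega
  apply List.ext_getElem?
  intro j
  rw [pv_get_foldsets _ _ _ _ (hnn ')'), pv_get_foldsets _ _ _ _ (hnn '('), hrep]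
  by_cases hj : j < cs.length
  · have hjm : ∀ c : Char, ((j : Int) ∈ (PySem.List.enumerate cs 0).filterMap
        (fun q => if q.2 = c then some q.1 else none)) ↔ cs[j] = c := by
      intro c
      rw [pv_mem_idxs]
      constructor
      · rintro ⟨k, hk, hjk, hc⟩
        have : k = j := by omega
        subst this; exact hc
      · intro hc; exact ⟨j, hj, by omega, hc⟩
    rw [List.getElem?_map, List.getElem?_eq_getElem hj]
    simp only [hjm, List.length_replicate, List.length_set, pv_len_foldsets, hj, and_true,
      List.getElem?_replicate, Option.map_some]
    by_cases h1 : cs[j] = ')'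
    · simp [h1, pvVal]
    · by_cases h2 : cs[j] = '('
      · simp [h1, h2, pvVal]
      · simp [h1, h2, pvVal, hj]
  · have h1 : ¬ j < (List.replicate cs.length (0 : Int)).length := by simpa using hj
    have h2 : ¬ j < cs.length := hj
    simp only [pv_len_foldsets, List.length_replicate, h2, and_false, if_false]
    rw [List.getElem?_eq_none (by simpa using hj), List.getElem?_eq_none (by simpa using hj)]

lemma pv_scan_eq (vs : List Int) (b : Int) :
    pvScan b vs = (List.range vs.length).map (fun k => b + (vs.take (k + 1)).sum) := by
  induction vs generalizing b with
  | nil => simp [pvScan]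
  | cons x t ih =>
    rw [pvScan, List.length_cons, List.range_succ_eq_map, List.map_cons, List.map_map, ih (b + x)]
    congr 1
    · simp
    · apply List.map_congr_left
      intro k _
      simp [Function.comp, List.take_succ_cons, add_assoc]

lemma pv_cumsum (vs : List Int) :
    (PySem.List.pyRange 0 (vs.length : Int) 1).map
        (fun i => (PySem.List.slice vs none (some (i + 1))).sum)
      = pvScan 0 vs := by
  rw [PySem.List.pyRange_one, List.map_map, pv_scan_eq]
  have : ((vs.length : Int) - 0).toNat = vs.length := by omega
  rw [this]
  apply List.map_congr_left
  intro k _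
  show (PySem.List.slice vs none (some ((0 : Int) + k + 1))).sum = 0 + (vs.take (k + 1)).sum
  have : (0 : Int) + k + 1 = ((k + 1 : Nat) : Int) := by push_cast; ring
  rw [this, PySem.List.slice_to_natCast, zero_add]

lemma pv_mfold_some (t : List Int) (a : Int) :
    t.foldl pvMStep (some a) = some (t.foldl max a) := by
  induction t generalizing a with
  | nil => rfl
  | cons x t ih =>
    rw [List.foldl_cons, List.foldl_cons]
    have hstep : pvMStep (some a) x = some (max a x) := by
      show (if x > a then some x else some a) = some (max a x)
      by_cases h : x > a
      · rw [if_pos h, max_eq_right (le_of_lt h)]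
      · rw [if_neg h, max_eq_left (by omega)]
    rw [hstep, ih]

lemma pv_mfold_none (l : List Int) :
    l.foldl pvMStep none = PySem.List.max? l (fun y => y) := by
  cases l with
  | nil => rfl
  | cons x t =>
    rw [PySem.List.max?_id_cons, List.foldl_cons]
    exact pv_mfold_some t x

lemma pv_foldB (cs : List Char) (o b : Int) (m : Option Int) :
    cs.foldl (fun (st : Int × Int × Option Int) ch =>
        let opens := if ch = '(' then st.1 + 1 else st.1
        let bal := if ch = '(' then st.2.1 + 1 else if ch = ')' then st.2.1 - 1 else st.2.1
        let best := match st.2.2 with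
          | none => some bal
          | some b => if bal > b then some bal else some b
        (opens, bal, best)) (o, b, m)
      = (o + (cs.countP (fun x => x = '(') : Int), b + (cs.map pvVal).sum,
          (pvScan b (cs.map pvVal)).foldl pvMStep m) := by
  induction cs generalizing o b m with
  | nil => simp [pvScan]
  | cons c t ih =>
    rw [List.foldl_cons]
    by_cases h1 : c = '('
    · rw [ih]
      simp only [h1, if_pos rfl, List.countP_cons, List.map_cons, List.sum_cons, pvVal, pvScan,
        List.foldl_cons, decide_true, if_pos rfl]
      refine Prod.ext ?_ (Prod.ext ?_ ?_) <;> simp [pvMStep] <;> push_cast <;> ring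
    · by_cases h2 : c = ')'
      · rw [ih]
        simp only [h1, h2, if_neg h1, if_pos rfl, List.countP_cons, List.map_cons, List.sum_cons,
          pvVal, pvScan, List.foldl_cons, decide_false]
        refine Prod.ext ?_ (Prod.ext ?_ ?_) <;>
          simp [pvMStep, h1, sub_eq_add_neg] <;> push_cast <;> ring
      · rw [ih]
        simp only [h1, h2, if_neg h1, if_neg h2, List.countP_cons, List.map_cons, List.sum_cons,
          pvVal, pvScan, List.foldl_cons, decide_false]
        refine Prod.ext ?_ (Prod.ext ?_ ?_) <;> simp [pvMStep, h1, h2] <;> push_cast <;> ring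

-- ===== VERDICT (by name: the statement is the Claim_ definition above) =====
theorem gp_getdepth_spec : Claim_equal_gp_getdepth := by
  intro expr _
  unfold Spec_gp_getdepth gp_getdepth gp_getdepth_alt
  simp only []
  rw [pv_foldB, pv_brvec, pv_len_idxs]
  dsimp only
  rw [pv_cumsum, pv_mfold_none]
  simp only [zero_add, Nat.cast_eq_zero, Nat.cast_eq_one]
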